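-- pv_equiv track=rewrite | github.com/weka511/bioinformatics | combinatorics.py | count_matchings
-- ===== SOURCE A (Python) =====
-- def partition(indices,i,j):
--     I1 = []
--     I2 = []
--
--     for k in indices:
--         if k==i: continue
--         if k==j: continue
--         if i<k and k <j:
--             I1.append(k)
--         else:
--             I2.append(k)
--
--     return (I1,I2)
--
-- def count_matchings(seq):
--     def wrapped_count(indices):
--         def count():
--             n      = len(indices)
--             if n<2: return 1
--             i      = min(indices)
--             count1 = wrapped_count(indices[1:]) #  If first node is not involved in a matching
--             count2 = 0                            #  If first node is involved in a matching
--             for j in range(i+1,max(indices)+1):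
--                 if seq[i] + seq[j]!=0: continue
--                 I1,I2   = partition(indices,i,j)
--                 count21 = wrapped_count(I1)
--                 count22 = wrapped_count(I2)
--                 count2 += (count21*count22)
--             return count1 + count2
--
--         key = str(indices)
--         if not key in cache:
--             cache[key] = count()
--         return cache[key]
--     cache = {}
--     return wrapped_count(list(range(len(seq))))
-- ===== SOURCE B (Python) =====
-- def count_matchings(seq):
--     # Interval recursion with an (l, r)-keyed memo: count(l, r) = number of
--     # noncrossing zero-sum matchings inside the half-open slice seq[l:r].
--     # No index lists are built, partitioned or stringified: an interval is just
--     # two integers, so each memoised state costs O(r-l) instead of A's O(n^2).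
--     n = len(seq)
--     memo = {}
--
--     def count(l, r):
--         if r - l < 2:
--             return 1
--         if (l, r) not in memo:
--             total = count(l + 1, r)
--             for j in range(l + 1, r):
--                 if seq[l] + seq[j] == 0:
--                     total += count(l + 1, j) * count(j + 1, r)
--             memo[(l, r)] = total
--         return memo[(l, r)]
--
--     return count(0, n)
-- ===== Notes on version B (the rewrite author's own statement) =====
-- stated objective: faster
-- what changed: Replaced A's top-down memoised recursion over explicit index lists (min/max scans, list slicing/partitioning and str(list) cache keys per call) by a memoised interval recursion on plain integer pairs (l, r) that never builds, partitions or stringifies an index list.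
import Mathlib
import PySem

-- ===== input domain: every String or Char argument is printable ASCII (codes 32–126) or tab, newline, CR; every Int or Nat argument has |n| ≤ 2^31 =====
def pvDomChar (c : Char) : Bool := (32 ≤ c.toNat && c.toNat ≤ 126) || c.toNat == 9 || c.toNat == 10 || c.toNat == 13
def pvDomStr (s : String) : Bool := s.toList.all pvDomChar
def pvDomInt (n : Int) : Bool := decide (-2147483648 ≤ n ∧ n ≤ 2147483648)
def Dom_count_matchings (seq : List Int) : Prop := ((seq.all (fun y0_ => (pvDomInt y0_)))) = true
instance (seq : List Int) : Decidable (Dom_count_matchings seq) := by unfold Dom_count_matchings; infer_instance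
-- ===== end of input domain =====

def pyPartition (indices : List Int) (i j : Int) : List Int × List Int :=
  match indices with
  | [] => ([], [])
  | k :: rest =>
    let p := pyPartition rest i j
    if k = i then p
    else if k = j then p
    else if i < k ∧ k < j then (k :: p.1, p.2)
    else (p.1, k :: p.2)

theorem pyPartition_length_le (indices : List Int) (i j : Int) :
    (pyPartition indices i j).1.length + (pyPartition indices i j).2.length ≤ indices.length := by
  induction indices with
  | nil => simp [pyPartition]
  | cons k rest ih =>
    simp only [pyPartition, List.length_cons]
    split_ifs <;> (try simp) <;> omega

theorem pyPartition_length_lt (indices : List Int) (i j : Int) (hi : i ∈ indices) :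
    (pyPartition indices i j).1.length < indices.length ∧
    (pyPartition indices i j).2.length < indices.length := by
  induction indices with
  | nil => simp at hi
  | cons k rest ih =>
    have h2 := pyPartition_length_le rest i j
    rcases List.mem_cons.mp hi with h | h
    · simp only [pyPartition, List.length_cons]
      split_ifs <;> (try simp) <;> omega
    · have h1 := ih h
      simp only [pyPartition, List.length_cons]
      split_ifs <;> (try simp) <;> omega

theorem min_getD_mem (xs : List Int) (h : xs ≠ []) :
    (PySem.List.min? xs (fun x => x)).getD 0 ∈ xs := by
  cases hm : PySem.List.min? xs (fun x => x) with
  | none => exact absurd ((PySem.List.min?_eq_none_iff xs _).mp hm) h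
  | some m => simpa using PySem.List.min?_mem hm

mutual
-- cache keyed by the indices list itself; Python keys by str(indices), which is
-- injective on lists of ints, so every lookup/store coincides with the Python cache
def wrappedCount (seq : List Int) (indices : List Int) (cache : PySem.Dict (List Int) Int) :
    Int × PySem.Dict (List Int) Int :=
  match cache.get? indices with
  | some v => (v, cache)
  | none =>
    if h : indices.length < 2 then (1, cache.insert indices 1)
    else
      let i := (PySem.List.min? indices (fun x => x)).getD 0
      let mx := (PySem.List.max? indices (fun x => x)).getD 0
      have hi : i ∈ indices := min_getD_mem indices (by intro hnil; simp [hnil] at h)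
      let p1 := wrappedCount seq (PySem.List.slice indices (some 1) none) cache
      let p2 := wcLoop seq indices i hi (PySem.List.pyRange (i + 1) (mx + 1) 1) (0, p1.2)
      (p1.1 + p2.1, p2.2.insert indices (p1.1 + p2.1))
termination_by (indices.length, 1, 0)
decreasing_by
  · refine Prod.Lex.left _ _ ?_
    rw [PySem.List.slice_from_one]
    cases indices with
    | nil => simp at h
    | cons a t => simp
  · exact Prod.Lex.right _ (Prod.Lex.left _ _ (by omega))

def wcLoop (seq : List Int) (indices : List Int) (i : Int) (hi : i ∈ indices)
    (js : List Int) (acc : Int × PySem.Dict (List Int) Int) : Int × PySem.Dict (List Int) Int :=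
  match js with
  | [] => acc
  | j :: rest =>
    -- seq[i], seq[j]: on every reachable call 0 ≤ i, j < len(seq), so the default is never used
    if PySem.List.pyGetD seq i 0 + PySem.List.pyGetD seq j 0 ≠ 0 then
      wcLoop seq indices i hi rest acc
    else
      let p := pyPartition indices i j
      let q1 := wrappedCount seq p.1 acc.2
      let q2 := wrappedCount seq p.2 q1.2
      wcLoop seq indices i hi rest (acc.1 + q1.1 * q2.1, q2.2)
termination_by (indices.length, 0, js.length + 1)
decreasing_by
  · refine Prod.Lex.right _ (Prod.Lex.right _ ?_); simp
  · exact Prod.Lex.left _ _ (pyPartition_length_lt indices i j hi).1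
  · exact Prod.Lex.left _ _ (pyPartition_length_lt indices i j hi).2
  · refine Prod.Lex.right _ (Prod.Lex.right _ ?_); simp
end

def count_matchings (seq : List Int) : Int :=
  (wrappedCount seq (PySem.List.pyRange 0 (PySem.List.len seq) 1) PySem.Dict.empty).1

-- ===== PORT B =====
-- port of B's nested helper count(l, r); the memo dict is threaded explicitly, and the
-- recursion carries a fuel counter as a totality guard (fuel = len(seq) always suffices,
-- since every recursive call shrinks the interval r - l by at least one)
def altCount (seq : List Int) (fuel : Nat) (l r : Int)
    (memo : PySem.Dict (Int × Int) Int) : Int × PySem.Dict (Int × Int) Int :=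
  if fuel = 0 then (1, memo)
  else if r - l < 2 then (1, memo)
  else
    match memo.get? (l, r) with
    | some v => (v, memo)
    | none =>
      let p1 := altCount seq (fuel - 1) (l + 1) r memo
      let p2 := (PySem.List.pyRange (l + 1) r 1).foldl (fun acc j =>
          if PySem.List.pyGetD seq l 0 + PySem.List.pyGetD seq j 0 = 0 then
            let q1 := altCount seq (fuel - 1) (l + 1) j acc.2
            let q2 := altCount seq (fuel - 1) (j + 1) r q1.2
            (acc.1 + q1.1 * q2.1, q2.2)
          else acc) (p1.1, p1.2)
      (p2.1, p2.2.insert (l, r) p2.1)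
termination_by fuel
decreasing_by all_goals omega

def count_matchings_alt (seq : List Int) : Int :=
  (altCount seq seq.length 0 (PySem.List.len seq) PySem.Dict.empty).1

-- ===== PRECONDITION & SPEC =====
def Spec_count_matchings (seq : List Int) (out : Int) : Prop := out = count_matchings_alt seq
instance (seq : List Int) (out : Int) : Decidable (Spec_count_matchings seq out) := by unfold Spec_count_matchings; infer_instance

-- ===== CLAIM (what is proved, stated in full; the proofs are below) =====
def Claim_equal_count_matchings : Prop := ∀ (seq : List Int), Dom_count_matchings seq → Spec_count_matchings seq (count_matchings seq)

-- ===== LEMMAS AND PROOFS =====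

def gG (seq : List Int) (a b : Int) : Int :=
  if 2 ≤ b - a then
    gG seq (a + 1) b +
      ((PySem.List.pyRange (a + 1) b 1).attach.map (fun x =>
        if PySem.List.pyGetD seq a 0 + PySem.List.pyGetD seq x.1 0 = 0 then
          gG seq (a + 1) x.1 * gG seq (x.1 + 1) b
        else 0)).sum
  else 1
termination_by (b - a).toNat
decreasing_by
  · omega
  · have := PySem.List.mem_pyRange_one.mp x.2; omega
  · have := PySem.List.mem_pyRange_one.mp x.2; omega

theorem gG_short (seq : List Int) (a b : Int) (h : b - a < 2) : gG seq a b = 1 := by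
  rw [gG]; simp [show ¬ 2 ≤ b - a by omega]

theorem gG_long (seq : List Int) (a b : Int) (h : 2 ≤ b - a) :
    gG seq a b = gG seq (a + 1) b +
      ((PySem.List.pyRange (a + 1) b 1).map (fun j =>
        if PySem.List.pyGetD seq a 0 + PySem.List.pyGetD seq j 0 = 0 then
          gG seq (a + 1) j * gG seq (j + 1) b
        else 0)).sum := by
  rw [gG, if_pos h]
  congr 1
  simp only [List.map_subtype, List.unattach_attach]

theorem range_min (a b : Int) (h : a < b) :
    (PySem.List.min? (PySem.List.pyRange a b 1) (fun x => x)).getD 0 = a := by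
  cases hm : PySem.List.min? (PySem.List.pyRange a b 1) (fun x => x) with
  | none =>
    have := (PySem.List.min?_eq_none_iff _ _).mp hm
    rw [PySem.List.pyRange_one_cons h] at this; simp at this
  | some m =>
    have hmem := PySem.List.min?_mem hm
    have h1 := PySem.List.mem_pyRange_one.mp hmem
    have h2 := PySem.List.min?_isMin hm a (PySem.List.mem_pyRange_one.mpr (by omega))
    simp at h2 ⊢
    omega

theorem range_max (a b : Int) (h : a < b) :
    (PySem.List.max? (PySem.List.pyRange a b 1) (fun x => x)).getD 0 = b - 1 := by
  cases hm : PySem.List.max? (PySem.List.pyRange a b 1) (fun x => x) with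
  | none =>
    have := (PySem.List.max?_eq_none_iff _ _).mp hm
    rw [PySem.List.pyRange_one_cons h] at this; simp at this
  | some m =>
    have hmem := PySem.List.max?_mem hm
    have h1 := PySem.List.mem_pyRange_one.mp hmem
    have h2 := PySem.List.max?_isMax hm (b - 1) (PySem.List.mem_pyRange_one.mpr (by omega))
    simp at h2 ⊢
    omega

theorem range_tail (a b : Int) (h : a < b) :
    PySem.List.slice (PySem.List.pyRange a b 1) (some 1) none = PySem.List.pyRange (a + 1) b 1 := by
  rw [PySem.List.slice_from_one, PySem.List.pyRange_one_cons h]; rfl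
theorem pyPartition_eq_filter (l : List Int) (i j : Int) :
    pyPartition l i j =
      (l.filter (fun k => decide (k ≠ i ∧ k ≠ j ∧ i < k ∧ k < j)),
       l.filter (fun k => decide (k ≠ i ∧ k ≠ j ∧ ¬(i < k ∧ k < j)))) := by
  induction l with
  | nil => simp [pyPartition]
  | cons k rest ih =>
    by_cases h1 : k = i
    · simp [pyPartition, h1, ih]
    · by_cases h2 : k = j
      · simp [pyPartition, h1, h2, ih]
      · by_cases h3 : i < k ∧ k < j
        · simp [pyPartition, h1, h2, h3, ih]
        · rcases (show ¬ i < k ∨ j ≤ k by omega) with h4 | h4 <;>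
            simp [pyPartition, h1, h2, h3, h4, ih]

theorem range_split (a b j : Int) (ha : a < b) (hj1 : a + 1 ≤ j) (hj2 : j < b) :
    PySem.List.pyRange a b 1 =
      [a] ++ PySem.List.pyRange (a + 1) j 1 ++ [j] ++ PySem.List.pyRange (j + 1) b 1 := by
  rw [PySem.List.pyRange_one_append a (a + 1) b (by omega) (by omega),
      PySem.List.pyRange_one_append (a + 1) j b (by omega) (by omega),
      PySem.List.pyRange_one_append j (j + 1) b (by omega) (by omega)]
  simp [PySem.List.pyRange_one_singleton]

theorem pyPartition_range (seq : List Int) (a b j : Int) (ha : a < b) (hj1 : a + 1 ≤ j) (hj2 : j < b) :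
    pyPartition (PySem.List.pyRange a b 1) a j =
      (PySem.List.pyRange (a + 1) j 1, PySem.List.pyRange (j + 1) b 1) := by
  rw [pyPartition_eq_filter, range_split a b j ha hj1 hj2]
  simp only [List.filter_append]
  have hIp : (PySem.List.pyRange (a + 1) j 1).filter
      (fun k => decide (k ≠ a ∧ k ≠ j ∧ a < k ∧ k < j)) = PySem.List.pyRange (a + 1) j 1 :=
    List.filter_eq_self.mpr (by
      intro k hk; have := PySem.List.mem_pyRange_one.mp hk; simp; omega)
  have hIq : (PySem.List.pyRange (a + 1) j 1).filter
      (fun k => decide (k ≠ a ∧ k ≠ j ∧ ¬(a < k ∧ k < j))) = [] :=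
    List.filter_eq_nil_iff.mpr (by
      intro k hk; have := PySem.List.mem_pyRange_one.mp hk; simp; omega)
  have hOp : (PySem.List.pyRange (j + 1) b 1).filter
      (fun k => decide (k ≠ a ∧ k ≠ j ∧ a < k ∧ k < j)) = [] :=
    List.filter_eq_nil_iff.mpr (by
      intro k hk; have := PySem.List.mem_pyRange_one.mp hk; simp; omega)
  have hOq : (PySem.List.pyRange (j + 1) b 1).filter
      (fun k => decide (k ≠ a ∧ k ≠ j ∧ ¬(a < k ∧ k < j))) = PySem.List.pyRange (j + 1) b 1 :=
    List.filter_eq_self.mpr (by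
      intro k hk; have := PySem.List.mem_pyRange_one.mp hk; simp; omega)
  have hap : ([a] : List Int).filter (fun k => decide (k ≠ a ∧ k ≠ j ∧ a < k ∧ k < j)) = [] := by simp
  have haq : ([a] : List Int).filter (fun k => decide (k ≠ a ∧ k ≠ j ∧ ¬(a < k ∧ k < j))) = [] := by simp
  have hjp : ([j] : List Int).filter (fun k => decide (k ≠ a ∧ k ≠ j ∧ a < k ∧ k < j)) = [] := by simp
  have hjq : ([j] : List Int).filter (fun k => decide (k ≠ a ∧ k ≠ j ∧ ¬(a < k ∧ k < j))) = [] := by simp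
  rw [Prod.mk.injEq]
  constructor
  · rw [hap, hIp, hjp, hOp]; simp
  · rw [haq, hIq, hjq, hOq]; simp

def InvA (seq : List Int) (c : PySem.Dict (List Int) Int) : Prop :=
  ∀ (a b v : Int), c.get? (PySem.List.pyRange a b 1) = some v → v = gG seq a b

theorem gG_congr (seq : List Int) (a b a' b' : Int)
    (h : PySem.List.pyRange a b 1 = PySem.List.pyRange a' b' 1) : gG seq a b = gG seq a' b' := by
  have hlen : (b - a).toNat = (b' - a').toNat := by
    have := congrArg List.length h
    simpa [PySem.List.length_pyRange_one] using this
  by_cases h2 : 2 ≤ b - a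
  · have ha : a < b := by omega
    have ha' : a' < b' := by omega
    rw [PySem.List.pyRange_one_cons ha, PySem.List.pyRange_one_cons ha'] at h
    have : a = a' := by injection h
    have hb : b = b' := by omega
    rw [this, hb]
  · rw [gG_short seq a b (by omega), gG_short seq a' b' (by omega)]

theorem InvA_insert (seq : List Int) (c : PySem.Dict (List Int) Int) (hc : InvA seq c)
    (a b : Int) : InvA seq (c.insert (PySem.List.pyRange a b 1) (gG seq a b)) := by
  intro a' b' v hv
  rw [PySem.Dict.get?_insert] at hv
  split at hv
  · rename_i heq
    have h2 := gG_congr seq a b a' b' heq.symm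
    have h3 := Option.some.inj hv
    omega
  · exact hc a' b' v hv

theorem wrappedA (seq : List Int) :
    ∀ (N : Nat) (a b : Int), (b - a).toNat ≤ N → ∀ c, InvA seq c →
      (wrappedCount seq (PySem.List.pyRange a b 1) c).1 = gG seq a b ∧
      InvA seq (wrappedCount seq (PySem.List.pyRange a b 1) c).2 := by
  intro N
  induction N with
  | zero =>
    intro a b hN c hc
    rw [wrappedCount]
    cases hg : c.get? (PySem.List.pyRange a b 1) with
    | some v => simp only [hg]; exact ⟨hc a b v hg, hc⟩
    | none =>
      simp only [hg]
      have hlen : (PySem.List.pyRange a b 1).length < 2 := by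
        rw [PySem.List.length_pyRange_one]; omega
      rw [dif_pos hlen]
      have h1 : gG seq a b = (1 : Int) := gG_short seq a b (by omega)
      refine ⟨h1.symm, ?_⟩
      have h2 := InvA_insert seq c hc a b
      rw [h1] at h2
      exact h2
  | succ N ih =>
    intro a b hN c hc
    rw [wrappedCount]
    cases hg : c.get? (PySem.List.pyRange a b 1) with
    | some v => simp only [hg]; exact ⟨hc a b v hg, hc⟩
    | none =>
      simp only [hg]
      by_cases hlen : (PySem.List.pyRange a b 1).length < 2
      · rw [dif_pos hlen]
        rw [PySem.List.length_pyRange_one] at hlen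
        have h1 : gG seq a b = (1 : Int) := gG_short seq a b (by omega)
        refine ⟨h1.symm, ?_⟩
        have h2 := InvA_insert seq c hc a b
        rw [h1] at h2
        exact h2
      · rw [dif_neg hlen]
        rw [PySem.List.length_pyRange_one] at hlen
        have hab : 2 ≤ b - a := by omega
        have hlt : a < b := by omega
        simp only [range_min a b hlt, range_max a b hlt, range_tail a b hlt,
          show b - 1 + 1 = b by omega]
        obtain ⟨hv1, hinv1⟩ := ih (a + 1) b (by omega) c hc
        have loop : ∀ (js : List Int), (∀ j ∈ js, a + 1 ≤ j ∧ j < b) →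
            ∀ (hp : a ∈ PySem.List.pyRange a b 1) (s : Int) (c0 : PySem.Dict (List Int) Int),
              InvA seq c0 →
              (wcLoop seq (PySem.List.pyRange a b 1) a hp js (s, c0)).1 =
                s + (js.map (fun j =>
                  if PySem.List.pyGetD seq a 0 + PySem.List.pyGetD seq j 0 = 0 then
                    gG seq (a + 1) j * gG seq (j + 1) b
                  else 0)).sum ∧
              InvA seq (wcLoop seq (PySem.List.pyRange a b 1) a hp js (s, c0)).2 := by
          intro js
          induction js with
          | nil => intro _ hp s c0 hc0; rw [wcLoop]; simp [hc0]
          | cons j rest ihr =>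
            intro hjs hp s c0 hc0
            have hj := hjs j (by simp)
            rw [wcLoop]
            by_cases hcond : PySem.List.pyGetD seq a 0 + PySem.List.pyGetD seq j 0 ≠ 0
            · rw [if_pos hcond]
              obtain ⟨e1, e2⟩ := ihr (fun x hx => hjs x (List.mem_cons_of_mem _ hx)) hp s c0 hc0
              refine ⟨?_, e2⟩
              rw [e1]
              simp [hcond]
            · rw [if_neg hcond]
              push_neg at hcond
              simp only [pyPartition_range seq a b j hlt hj.1 hj.2]
              obtain ⟨f1, f2⟩ := ih (a + 1) j (by omega) c0 hc0
              obtain ⟨g1, g2⟩ := ih (j + 1) b (by omega) _ f2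
              rw [f1, g1]
              obtain ⟨e1, e2⟩ := ihr (fun x hx => hjs x (List.mem_cons_of_mem _ hx)) hp
                (s + gG seq (a + 1) j * gG seq (j + 1) b) _ g2
              refine ⟨?_, e2⟩
              rw [e1]
              simp [hcond]
              ring
        obtain ⟨l1, l2⟩ := loop (PySem.List.pyRange (a + 1) b 1)
          (fun x hx => by have := PySem.List.mem_pyRange_one.mp hx; omega)
          (PySem.List.mem_pyRange_one.mpr (by omega)) 0
          (wrappedCount seq (PySem.List.pyRange (a + 1) b 1) c).2 hinv1
        have hval : (wrappedCount seq (PySem.List.pyRange (a + 1) b 1) c).1 +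
            (wcLoop seq (PySem.List.pyRange a b 1) a
              (PySem.List.mem_pyRange_one.mpr (by omega)) (PySem.List.pyRange (a + 1) b 1)
              (0, (wrappedCount seq (PySem.List.pyRange (a + 1) b 1) c).2)).1 = gG seq a b := by
          rw [hv1, l1, gG_long seq a b hab]
          ring
        have h3 := InvA_insert seq _ l2 a b
        rw [← hval] at h3
        exact ⟨hval, h3⟩

theorem A_eq_g (seq : List Int) : count_matchings seq = gG seq 0 (PySem.List.len seq) := by
  have hinv : InvA seq PySem.Dict.empty := by
    intro a b v hv
    simp [PySem.Dict.get?_empty] at hv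
  have := (wrappedA seq (PySem.List.len seq - 0).toNat 0 (PySem.List.len seq)
    (le_refl _) PySem.Dict.empty hinv).1
  exact this


def InvB (seq : List Int) (m : PySem.Dict (Int × Int) Int) : Prop :=
  ∀ l r v : Int, m.get? (l, r) = some v → v = gG seq l r

theorem InvB_insert (seq : List Int) (m : PySem.Dict (Int × Int) Int) (hm : InvB seq m)
    (l r : Int) : InvB seq (m.insert (l, r) (gG seq l r)) := by
  intro l' r' v hv
  rw [PySem.Dict.get?_insert] at hv
  split at hv
  · rename_i heq
    obtain ⟨e1, e2⟩ := Prod.mk.inj heq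
    have h3 := Option.some.inj hv
    rw [e1, e2]
    omega
  · exact hm l' r' v hv

theorem altMain (seq : List Int) :
    ∀ (fuel : Nat) (l r : Int), (r - l).toNat ≤ fuel → ∀ m, InvB seq m →
      (altCount seq fuel l r m).1 = gG seq l r ∧ InvB seq (altCount seq fuel l r m).2 := by
  intro fuel
  induction fuel with
  | zero =>
    intro l r hN m hm
    rw [altCount, if_pos rfl]
    exact ⟨(gG_short seq l r (by omega)).symm, hm⟩
  | succ fuel ih =>
    intro l r hN m hm
    rw [altCount, if_neg (Nat.succ_ne_zero fuel)]
    by_cases h2 : r - l < 2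
    · rw [if_pos h2]
      exact ⟨(gG_short seq l r h2).symm, hm⟩
    · rw [if_neg h2]
      cases hg : m.get? (l, r) with
      | some v => simp only [hg]; exact ⟨hm l r v hg, hm⟩
      | none =>
        simp only [hg, Nat.add_sub_cancel]
        obtain ⟨hv1, hi1⟩ := ih (l + 1) r (by omega) m hm
        have loop : ∀ (js : List Int), (∀ j ∈ js, l + 1 ≤ j ∧ j < r) →
            ∀ (t : Int) (m0 : PySem.Dict (Int × Int) Int), InvB seq m0 →
            (js.foldl (fun acc j =>
                if PySem.List.pyGetD seq l 0 + PySem.List.pyGetD seq j 0 = 0 then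
                  let q1 := altCount seq fuel (l + 1) j acc.2
                  let q2 := altCount seq fuel (j + 1) r q1.2
                  (acc.1 + q1.1 * q2.1, q2.2)
                else acc) (t, m0)).1 =
              t + (js.map (fun j =>
                if PySem.List.pyGetD seq l 0 + PySem.List.pyGetD seq j 0 = 0 then
                  gG seq (l + 1) j * gG seq (j + 1) r
                else 0)).sum ∧
            InvB seq (js.foldl (fun acc j =>
                if PySem.List.pyGetD seq l 0 + PySem.List.pyGetD seq j 0 = 0 then
                  let q1 := altCount seq fuel (l + 1) j acc.2
                  let q2 := altCount seq fuel (j + 1) r q1.2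
                  (acc.1 + q1.1 * q2.1, q2.2)
                else acc) (t, m0)).2 := by
          intro js
          induction js with
          | nil => intro _ t m0 hm0; simpa using hm0
          | cons j rest ihr =>
            intro hjs t m0 hm0
            have hj := hjs j (by simp)
            rw [List.foldl_cons]
            by_cases hcond : PySem.List.pyGetD seq l 0 + PySem.List.pyGetD seq j 0 = 0
            · rw [if_pos hcond]
              dsimp only
              obtain ⟨f1, f2⟩ := ih (l + 1) j (by omega) m0 hm0
              obtain ⟨g1, g2⟩ := ih (j + 1) r (by omega) _ f2
              rw [f1, g1]
              obtain ⟨e1, e2⟩ := ihr (fun x hx => hjs x (List.mem_cons_of_mem _ hx))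
                (t + gG seq (l + 1) j * gG seq (j + 1) r) _ g2
              refine ⟨?_, e2⟩
              rw [e1]
              simp [hcond]
              ring
            · rw [if_neg hcond]
              obtain ⟨e1, e2⟩ := ihr (fun x hx => hjs x (List.mem_cons_of_mem _ hx)) t m0 hm0
              refine ⟨?_, e2⟩
              rw [e1]
              simp [hcond]
        obtain ⟨l1, l2⟩ := loop (PySem.List.pyRange (l + 1) r 1)
          (fun j hj => PySem.List.mem_pyRange_one.mp hj)
          (altCount seq fuel (l + 1) r m).1 (altCount seq fuel (l + 1) r m).2 hi1
        have hval : ((PySem.List.pyRange (l + 1) r 1).foldl (fun acc j =>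
            if PySem.List.pyGetD seq l 0 + PySem.List.pyGetD seq j 0 = 0 then
              let q1 := altCount seq fuel (l + 1) j acc.2
              let q2 := altCount seq fuel (j + 1) r q1.2
              (acc.1 + q1.1 * q2.1, q2.2)
            else acc)
            ((altCount seq fuel (l + 1) r m).1, (altCount seq fuel (l + 1) r m).2)).1 =
            gG seq l r := by
          rw [l1, hv1, gG_long seq l r (by omega)]
        have h3 := InvB_insert seq _ l2 l r
        rw [← hval] at h3
        exact ⟨hval, h3⟩

theorem B_eq_g (seq : List Int) : count_matchings_alt seq = gG seq 0 (PySem.List.len seq) := by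
  have hempty : InvB seq PySem.Dict.empty := by
    intro l r v hv
    simp [PySem.Dict.get?_empty] at hv
  refine (altMain seq seq.length 0 (PySem.List.len seq) ?_ PySem.Dict.empty hempty).1
  simp [PySem.List.len_eq]

-- ===== VERDICT (by name: the statement is the Claim_ definition above) =====
theorem count_matchings_spec : Claim_equal_count_matchings := by
  intro seq _
  unfold Spec_count_matchings
  rw [A_eq_g, B_eq_g]
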